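-- pv_equiv track=rewrite | github.com/greglu1976/uniomni | abbrs.py | get_abbrs_new
-- ===== SOURCE A (Python) =====
-- def get_abbrs_new(word_list, abbr_dict):
--     abbr_set = set(abbr_dict.keys())
--     new_list = []
--     for word in word_list:
--         for abbr in abbr_set:
--             if abbr in word:
--                 new_list.append(abbr)
--     word_set = set(new_list)
--     word_list = sorted(list(word_set))
--     return word_list
-- ===== SOURCE B (Python) =====
-- def get_abbrs_new(word_list, abbr_dict):
--     # Index phase: enumerate every substring of every word whose length does not
--     # exceed the longest abbreviation, into one set; then a single set
--     # intersection with the keys replaces the per-abbreviation scan over words.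
--     keys = set(abbr_dict)
--     maxlen = max(map(len, keys), default=0)
--     subs = set()
--     for word in word_list:
--         n = len(word)
--         for i in range(n + 1):
--             top = min(i + maxlen, n)
--             for j in range(i, top + 1):
--                 subs.add(word[i:j])
--     return sorted(keys & subs)
-- ===== Notes on version B (the rewrite author's own statement) =====
-- stated objective: faster
-- what changed: B inverts the search: instead of testing every abbreviation against every word with a substring scan, it builds one set of all substrings (up to the longest key's length) of all words in a single indexing pass and intersects it with the key set, so the per-abbreviation scan over all words disappears.
import Mathlib
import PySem

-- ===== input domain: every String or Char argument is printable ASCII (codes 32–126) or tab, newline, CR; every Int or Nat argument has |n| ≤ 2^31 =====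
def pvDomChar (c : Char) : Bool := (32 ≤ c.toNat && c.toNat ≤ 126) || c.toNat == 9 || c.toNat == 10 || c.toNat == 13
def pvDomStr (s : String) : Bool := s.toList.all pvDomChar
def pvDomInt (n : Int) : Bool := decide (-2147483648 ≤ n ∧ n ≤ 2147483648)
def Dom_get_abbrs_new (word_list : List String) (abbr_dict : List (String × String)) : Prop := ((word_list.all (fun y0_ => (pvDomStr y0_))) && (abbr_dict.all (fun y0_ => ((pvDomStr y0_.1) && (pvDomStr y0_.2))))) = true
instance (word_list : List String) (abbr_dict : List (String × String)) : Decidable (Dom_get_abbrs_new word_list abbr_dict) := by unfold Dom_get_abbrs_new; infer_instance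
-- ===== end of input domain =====

-- B replaces A's per-abbreviation substring scans over the words by one indexing pass that
-- collects all bounded-length substrings of the words into a set and intersects it with the keys
-- (measured faster in a timing run; return values identical).

-- ===== PORT A =====
-- A: for every word, scan every key; append every hit into new_list, dedup with set(), sort.
def get_abbrs_new (word_list : List String) (abbr_dict : List (String × String)) : List String :=
  let abbr_set := PySem.Set.ofList (abbr_dict.map Prod.fst)
  let new_list := word_list.foldl
    (fun nl word => abbr_set.foldl
      (fun nl abbr => if PySem.Str.isIn abbr word then nl ++ [abbr] else nl) nl) []
  PySem.List.sorted (PySem.Set.ofList new_list) (fun x => x) false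

-- ===== PORT B =====
-- B: one indexing pass collects every substring word[i:j] with j - i ≤ maxlen (the longest
-- key's length) into the set subs; the answer is sorted(keys & subs).
def get_abbrs_new_alt (word_list : List String) (abbr_dict : List (String × String)) : List String :=
  let keys := PySem.Set.ofList (abbr_dict.map Prod.fst)
  let maxlen : Int := (PySem.List.max? (keys.map PySem.Str.len) (fun x => x)).getD 0
  let subs := word_list.foldl
    (fun subs word =>
      let n := PySem.Str.len word
      (PySem.List.pyRange 0 (n + 1) 1).foldl
        (fun subs i =>
          let top := min (i + maxlen) n
          (PySem.List.pyRange i (top + 1) 1).foldl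
            (fun subs j => PySem.Set.add subs (PySem.Str.slice word (some i) (some j))) subs)
        subs)
    PySem.Set.empty
  PySem.List.sorted (PySem.Set.inter keys subs) (fun x => x) false

-- ===== PRECONDITION & SPEC =====
def Spec_get_abbrs_new (word_list : List String) (abbr_dict : List (String × String)) (out : List String) : Prop := out = get_abbrs_new_alt word_list abbr_dict
instance (word_list : List String) (abbr_dict : List (String × String)) (out : List String) : Decidable (Spec_get_abbrs_new word_list abbr_dict out) := by unfold Spec_get_abbrs_new; infer_instance

-- ===== CLAIM (what is proved, stated in full; the proofs are below) =====
def Claim_equal_get_abbrs_new : Prop := ∀ (word_list : List String) (abbr_dict : List (String × String)), Dom_get_abbrs_new word_list abbr_dict → Spec_get_abbrs_new word_list abbr_dict (get_abbrs_new word_list abbr_dict)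

-- ===== LEMMAS AND PROOFS =====

-- Generic membership through a foldl whose step adds exactly the elements satisfying P.
lemma mem_foldl_iff {α β : Type} (g : List α → β → List α) (P : α → β → Prop)
    (hg : ∀ s b x, x ∈ g s b ↔ x ∈ s ∨ P x b) :
    ∀ (l : List β) (s : List α) (x : α), x ∈ l.foldl g s ↔ x ∈ s ∨ ∃ b ∈ l, P x b := by
  intro l
  induction l with
  | nil => simp
  | cons b l ih =>
    intro s x
    rw [List.foldl_cons, ih, hg]
    simp only [List.mem_cons]
    constructor
    · rintro ((h | h) | ⟨c, hc, hp⟩)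
      · exact Or.inl h
      · exact Or.inr ⟨b, Or.inl rfl, h⟩
      · exact Or.inr ⟨c, Or.inr hc, hp⟩
    · rintro (h | ⟨c, rfl | hc, hp⟩)
      · exact Or.inl (Or.inl h)
      · exact Or.inl (Or.inr hp)
      · exact Or.inr ⟨c, hc, hp⟩

-- A bounded slice of a word, as a String equation, is exactly an infix of bounded length.
lemma slice_mem_iff (w x : String) (m : Int) (hx : (x.toList.length : Int) ≤ m) :
    (∃ i ∈ PySem.List.pyRange 0 (PySem.Str.len w + 1) 1,
       ∃ j ∈ PySem.List.pyRange i (min (i + m) (PySem.Str.len w) + 1) 1,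
         x = PySem.Str.slice w (some i) (some j)) ↔ x.toList <:+: w.toList := by
  have hlen : PySem.Str.len w = (w.toList.length : Int) := by
    simp [PySem.Str.len_eq]
  constructor
  · rintro ⟨i, hi, j, hj, hx⟩
    rw [PySem.List.mem_pyRange_one] at hi hj
    obtain ⟨hi0, _⟩ := hi
    obtain ⟨hij, _⟩ := hj
    have hj0 : 0 ≤ j := le_trans hi0 hij
    have hxl : x.toList = (w.toList.drop i.toNat).take (j.toNat - i.toNat) := by
      rw [hx, PySem.Str.toList_slice, PySem.Chars.slice_eq_listSlice,
        PySem.List.slice_toNat _ hi0 hj0]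
    rw [hxl]
    exact ((List.take_prefix _ _).isInfix).trans ((List.drop_suffix _ _).isInfix)
  · rintro ⟨s, t, hst⟩
    refine ⟨(s.length : Int), ?_, (s.length : Int) + (x.toList.length : Int), ?_, ?_⟩
    · rw [PySem.List.mem_pyRange_one]
      have : s.length + x.toList.length + t.length = w.toList.length := by
        rw [← hst]; simp; omega
      constructor
      · positivity
      · rw [hlen]; omega
    · rw [PySem.List.mem_pyRange_one]
      have : s.length + x.toList.length + t.length = w.toList.length := by
        rw [← hst]; simp; omega
      constructor
      · omega
      · rw [hlen]; omega
    · rw [← String.toList_inj, PySem.Str.toList_slice, PySem.Chars.slice_eq_listSlice]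
      have : (s.length : Int) + (x.toList.length : Int) = ((s.length + x.toList.length : Nat) : Int) := by
        push_cast; ring
      rw [this, PySem.List.slice_natCast]
      have hdrop : w.toList.drop s.length = x.toList ++ t := by
        rw [← hst, List.append_assoc, List.drop_left]
      rw [hdrop]
      simp

-- Membership in B's substring index.
lemma mem_subs_iff (word_list : List String) (m : Int) (x : String)
    (hx : (x.toList.length : Int) ≤ m) :
    (x ∈ word_list.foldl
      (fun subs word =>
        let n := PySem.Str.len word
        (PySem.List.pyRange 0 (n + 1) 1).foldl
          (fun subs i =>
            let top := min (i + m) n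
            (PySem.List.pyRange i (top + 1) 1).foldl
              (fun subs j => PySem.Set.add subs (PySem.Str.slice word (some i) (some j))) subs)
          subs)
      PySem.Set.empty) ↔ ∃ w ∈ word_list, x.toList <:+: w.toList := by
  have inner : ∀ (word : String) (i : Int) (s : List String) (y : String),
      y ∈ (PySem.List.pyRange i (min (i + m) (PySem.Str.len word) + 1) 1).foldl
        (fun subs j => PySem.Set.add subs (PySem.Str.slice word (some i) (some j))) s ↔
      y ∈ s ∨ ∃ j ∈ PySem.List.pyRange i (min (i + m) (PySem.Str.len word) + 1) 1,
        y = PySem.Str.slice word (some i) (some j) := by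
    intro word i s y
    exact mem_foldl_iff _ (fun y j => y = PySem.Str.slice word (some i) (some j))
      (fun s j y => PySem.Set.mem_add s _ y) _ s y
  have middle : ∀ (word : String) (s : List String) (y : String),
      y ∈ (PySem.List.pyRange 0 (PySem.Str.len word + 1) 1).foldl
        (fun subs i =>
          (PySem.List.pyRange i (min (i + m) (PySem.Str.len word) + 1) 1).foldl
            (fun subs j => PySem.Set.add subs (PySem.Str.slice word (some i) (some j))) subs) s ↔
      y ∈ s ∨ ∃ i ∈ PySem.List.pyRange 0 (PySem.Str.len word + 1) 1,
        ∃ j ∈ PySem.List.pyRange i (min (i + m) (PySem.Str.len word) + 1) 1,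
          y = PySem.Str.slice word (some i) (some j) := by
    intro word s y
    exact mem_foldl_iff _
      (fun y i => ∃ j ∈ PySem.List.pyRange i (min (i + m) (PySem.Str.len word) + 1) 1,
        y = PySem.Str.slice word (some i) (some j))
      (fun s i y => inner word i s y) _ s y
  have outer := mem_foldl_iff
    (fun subs word =>
      (PySem.List.pyRange 0 (PySem.Str.len word + 1) 1).foldl
        (fun subs i =>
          (PySem.List.pyRange i (min (i + m) (PySem.Str.len word) + 1) 1).foldl
            (fun subs j => PySem.Set.add subs (PySem.Str.slice word (some i) (some j))) subs)
        subs)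
    (fun y word => ∃ i ∈ PySem.List.pyRange 0 (PySem.Str.len word + 1) 1,
      ∃ j ∈ PySem.List.pyRange i (min (i + m) (PySem.Str.len word) + 1) 1,
        y = PySem.Str.slice word (some i) (some j))
    (fun s word y => middle word s y) word_list PySem.Set.empty x
  rw [outer]
  simp only [PySem.Set.empty, List.not_mem_nil, false_or]
  constructor
  · rintro ⟨w, hw, h⟩
    exact ⟨w, hw, (slice_mem_iff w x m hx).mp h⟩
  · rintro ⟨w, hw, h⟩
    exact ⟨w, hw, (slice_mem_iff w x m hx).mpr h⟩

-- Every key's length is bounded by B's maxlen.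
lemma key_len_le (keys : List String) (a : String) (ha : a ∈ keys) :
    (a.toList.length : Int) ≤ (PySem.List.max? (keys.map PySem.Str.len) (fun x => x)).getD 0 := by
  cases hm : PySem.List.max? (keys.map PySem.Str.len) (fun x => x) with
  | none =>
    exfalso
    have : keys.map PySem.Str.len ≠ [] := by
      simp [List.map_eq_nil_iff]
      rintro rfl; exact List.not_mem_nil ha
    exact this ((PySem.List.max?_eq_none_iff _ _).mp hm)
  | some v =>
    have := PySem.List.max?_isMax hm (PySem.Str.len a) (List.mem_map_of_mem ha)
    have hlen : PySem.Str.len a = (a.toList.length : Int) := by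
      simp [PySem.Str.len_eq]
    simpa [hlen] using this

-- Stable sorts of two nodup lists with the same elements agree.
lemma sorted_eq_of_nodup_of_mem_iff (xs ys : List String) (hx : xs.Nodup) (hy : ys.Nodup)
    (h : ∀ a, a ∈ xs ↔ a ∈ ys) :
    PySem.List.sorted xs (fun x => x) false = PySem.List.sorted ys (fun x => x) false := by
  have hperm : ys.Perm xs := (List.perm_ext_iff_of_nodup hy hx).mpr (fun a => (h a).symm)
  have hsp : (PySem.List.sorted ys (fun x => x) false).Perm xs :=
    (PySem.List.sorted_perm ys (fun x => x) false).trans hperm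
  have hle : (PySem.List.sorted ys (fun x => x) false).Pairwise (fun a b => a ≤ b) :=
    PySem.List.sorted_pairwise ys (fun x => x)
  have hnd : (PySem.List.sorted ys (fun x => x) false).Nodup :=
    ((PySem.List.sorted_perm ys (fun x => x) false).nodup_iff).mpr hy
  have hlt : (PySem.List.sorted ys (fun x => x) false).Pairwise (fun a b => a < b) :=
    (hle.and hnd).imp (fun hab => lt_of_le_of_ne hab.1 hab.2)
  exact PySem.List.sorted_eq_of_perm_of_pairwise_lt xs (PySem.List.sorted ys (fun x => x) false) (fun x => x) hsp hlt

theorem get_abbrs_new_eq (word_list : List String) (abbr_dict : List (String × String)) :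
    get_abbrs_new word_list abbr_dict = get_abbrs_new_alt word_list abbr_dict := by
  unfold get_abbrs_new get_abbrs_new_alt
  simp only [PySem.List.foldl_append_if_eq_filter, PySem.List.foldl_append_eq_flatMap,
    List.nil_append]
  apply sorted_eq_of_nodup_of_mem_iff
  · exact PySem.Set.nodup_ofList _
  · exact PySem.Set.nodup_inter _ _ (PySem.Set.nodup_ofList _)
  · intro a
    rw [PySem.Set.mem_inter]
    constructor
    · intro h
      rw [PySem.Set.mem_ofList, List.mem_flatMap] at h
      obtain ⟨w, hw, ha⟩ := h
      rw [List.mem_filter] at ha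
      obtain ⟨hamem, hain⟩ := ha
      have hkey : a ∈ PySem.Set.ofList (abbr_dict.map Prod.fst) := hamem
      refine ⟨hkey, ?_⟩
      rw [mem_subs_iff _ _ _ (key_len_le _ _ hkey)]
      exact ⟨w, hw, (PySem.Str.isIn_iff_infix a w).mp hain⟩
    · rintro ⟨hkey, hsub⟩
      rw [mem_subs_iff _ _ _ (key_len_le _ _ hkey)] at hsub
      obtain ⟨w, hw, hinf⟩ := hsub
      rw [PySem.Set.mem_ofList, List.mem_flatMap]
      refine ⟨w, hw, ?_⟩
      rw [List.mem_filter]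
      exact ⟨hkey, (PySem.Str.isIn_iff_infix a w).mpr hinf⟩

-- ===== VERDICT (by name: the statement is the Claim_ definition above) =====
theorem get_abbrs_new_spec : Claim_equal_get_abbrs_new := by
  intro word_list abbr_dict _
  exact get_abbrs_new_eq word_list abbr_dict
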